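-- pv_equiv track=rewrite | github.com/gahjelle/flipflop | python/src/2025_dream-vacation/02_rollercoaster-heights/ff202502.py | part2
-- ===== SOURCE A (Python) =====
-- import itertools
--
-- def part2(moves: list[int]) -> int:
--     """Solve part 2."""
--     count, acc_moves = 0, []
--     for previous, current in itertools.pairwise([0, *moves]):
--         if current != previous:
--             count = 0
--         count += 1
--         acc_moves.append(count * current)
--     return max_accumulated(acc_moves)
--
-- def max_accumulated(moves: list[int]) -> int:
--     """Find the maximum of the accumulated values.
--
--     ## Examples
--
--     >>> max_accumulated([1, 2, 3, -4, 2])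
--     6
--     >>> max_accumulated([-10, 1, 2, 3, 2])
--     0
--     >>> max_accumulated([1, 2, 3, 4])
--     10
--     """
--     return max(itertools.accumulate([0, *moves]))
-- ===== SOURCE B (Python) =====
-- from itertools import groupby
--
--
-- def part2(moves: list[int]) -> int:
--     """Solve part 2: run-length encode the moves; each run of value v and
--     length k contributes v*k*(k+1)//2 to the prefix sum, and the overall
--     maximum prefix sum can only occur at the end of a positive run (or be 0)."""
--     best = total = 0
--     for value, group in groupby(moves):
--         k = sum(1 for _ in group)
--         total += value * k * (k + 1) // 2
--         if value > 0 and total > best: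
--             best = total
--     return best
-- ===== Notes on version B (the rewrite author's own statement) =====
-- stated objective: alternative
-- what changed: Instead of expanding every element into a weighted list, accumulating all prefix sums and taking their max, B run-length encodes the moves with groupby and uses the closed-form triangular contribution v*k*(k+1)//2 per run, checking a maximum candidate only at the end of each positive run (the max prefix sum can only occur there or be 0).
import Mathlib
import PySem

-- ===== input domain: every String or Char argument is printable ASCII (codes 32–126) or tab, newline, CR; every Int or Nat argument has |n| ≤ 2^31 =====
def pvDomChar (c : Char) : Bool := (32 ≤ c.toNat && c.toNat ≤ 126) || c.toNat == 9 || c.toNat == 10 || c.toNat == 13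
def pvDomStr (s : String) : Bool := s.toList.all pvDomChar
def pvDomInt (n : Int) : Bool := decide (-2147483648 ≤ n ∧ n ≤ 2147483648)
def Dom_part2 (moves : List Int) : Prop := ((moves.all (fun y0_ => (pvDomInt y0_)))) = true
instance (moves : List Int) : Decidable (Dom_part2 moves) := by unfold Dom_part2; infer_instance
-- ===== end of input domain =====

-- B replaces A's elementwise pipeline (pairwise run-counting list, prefix-sum list, max) by run-length
-- encoding with a closed-form triangular contribution per run and one max-candidate per positive run.


-- ===== PORT A =====
-- one step of itertools.accumulate: extend the prefix-sum list with the next running sum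
def accStep (st : List Int × Int) (x : Int) : List Int × Int := (st.1 ++ [st.2 + x], st.2 + x)

-- max(itertools.accumulate([0, *moves])): build the list of prefix sums (seeded with 0), then max of that nonempty list.
def max_accumulated (moves : List Int) : Int :=
  match (moves.foldl accStep ([0], 0)).1 with
  | [] => 0          -- unreachable: the list starts with the seed 0
  | h :: t => t.foldl max h

-- loop body of A: reset count when the value changes, append count*current
def part2Step (s : Int × List Int) (pc : Int × Int) : Int × List Int :=
  let count := if pc.2 ≠ pc.1 then 0 else s.1
  (count + 1, s.2 ++ [(count + 1) * pc.2])

-- itertools.pairwise([0, *moves]) = zip (0 :: moves) moves; loop carries (count, acc_moves).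
def part2 (moves : List Int) : Int :=
  max_accumulated ((List.zip ((0 : Int) :: moves) moves).foldl part2Step (0, [])).2

-- ===== PORT B =====
-- itertools.groupby(moves) with the length of each group: ported as run-length encoding (value, length)
def splitRuns : List Int → List (Int × Nat)
  | [] => []
  | v :: tl =>
    (v, 1 + (tl.takeWhile (fun m => m == v)).length) :: splitRuns (tl.dropWhile (fun m => m == v))
termination_by ms => ms.length
decreasing_by simpa using Nat.lt_succ_of_le (List.length_dropWhile_le _ _)

-- loop body of B: add the run's closed-form contribution value*k*(k+1)//2, record a candidate max for positive runs
def runStep (st : Int × Int) (r : Int × Nat) : Int × Int :=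
  let total := st.1 + PySem.Int.floordiv (r.1 * (r.2 : Int) * ((r.2 : Int) + 1)) 2
  (total, if r.1 > 0 ∧ total > st.2 then total else st.2)

def part2_alt (moves : List Int) : Int :=
  ((splitRuns moves).foldl runStep (0, 0)).2

-- ===== PRECONDITION & SPEC =====
def Spec_part2 (moves : List Int) (out : Int) : Prop := out = part2_alt moves
instance (moves : List Int) (out : Int) : Decidable (Spec_part2 moves out) := by unfold Spec_part2; infer_instance

-- ===== CLAIM (what is proved, stated in full; the proofs are below) =====
def Claim_equal_part2 : Prop := ∀ (moves : List Int), Dom_part2 moves → Spec_part2 moves (part2 moves)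

-- ===== LEMMAS AND PROOFS =====

-- the weighted run-length list A's first loop builds, as a structural recursion
def genAcc (prev count : Int) : List Int → List Int
  | [] => []
  | m :: ms =>
    let c := if m ≠ prev then 1 else count + 1
    c * m :: genAcc m c ms

-- max over prefix sums of a list, starting from (total, best)
def maxAcc (total best : Int) : List Int → Int
  | [] => best
  | x :: xs => maxAcc (total + x) (max best (total + x)) xs

-- the weighted elements of one run of value v and length k, entered with prior in-run count c
def seg (v : Int) (c : Int) : Nat → List Int
  | 0 => []
  | k + 1 => (c + 1) * v :: seg v (c + 1) k

-- expansion of a run list back to the weighted element list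
def expand : List (Int × Nat) → List Int
  | [] => []
  | (v, k) :: rs => seg v 0 k ++ expand rs

-- B's loop, as a structural recursion
def runsGo (t b : Int) : List (Int × Nat) → Int
  | [] => b
  | (v, k) :: rs =>
    let tt := t + PySem.Int.floordiv (v * (k : Int) * ((k : Int) + 1)) 2
    runsGo tt (if v > 0 ∧ tt > b then tt else b) rs

-- ---- A-side: part2 moves = maxAcc 0 0 (genAcc 0 0 moves) ----

lemma part2_loop_acc (ms : List Int) : ∀ (prev count : Int) (l : List Int),
    ((List.zip (prev :: ms) ms).foldl part2Step (count, l)).2 = l ++ genAcc prev count ms := by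
  induction ms with
  | nil => intro prev count l; simp [genAcc]
  | cons m ms ih =>
    intro prev count l
    rw [List.zip_cons_cons, List.foldl_cons]
    by_cases h : m = prev
    · rw [show part2Step (count, l) (prev, m) = (count + 1, l ++ [(count + 1) * m]) from by
        simp [part2Step, h]]
      rw [ih m (count + 1) (l ++ [(count + 1) * m])]
      simp [genAcc, h]
    · rw [show part2Step (count, l) (prev, m) = (0 + 1, l ++ [(0 + 1) * m]) from by
        simp [part2Step, h]]
      rw [ih m (0 + 1) (l ++ [(0 + 1) * m])]
      simp [genAcc, h]

lemma sums_loop (xs : List Int) : ∀ (l : List Int) (t : Int),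
    (xs.foldl accStep (l, t)).1 = l ++ (xs.foldl accStep ([], t)).1 := by
  induction xs with
  | nil => intro l t; simp
  | cons x xs ih =>
    intro l t
    rw [List.foldl_cons, List.foldl_cons,
      show accStep (l, t) x = (l ++ [t + x], t + x) from rfl,
      show accStep ([], t) x = ([] ++ [t + x], t + x) from rfl,
      ih (l ++ [t + x]) (t + x), ih ([] ++ [t + x]) (t + x)]
    simp

lemma foldl_max_sums (xs : List Int) : ∀ (t b : Int),
    ((xs.foldl accStep ([], t)).1).foldl max b = maxAcc t b xs := by
  induction xs with
  | nil => intro t b; simp [maxAcc]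
  | cons x xs ih =>
    intro t b
    rw [List.foldl_cons, show accStep ([], t) x = ([] ++ [t + x], t + x) from rfl,
      sums_loop xs ([] ++ [t + x]) (t + x)]
    simp only [List.nil_append, List.cons_append, List.foldl_cons, maxAcc]
    exact ih (t + x) (max b (t + x))

lemma max_accumulated_eq (xs : List Int) : max_accumulated xs = maxAcc 0 0 xs := by
  unfold max_accumulated
  rw [sums_loop xs [0] 0]
  simp only [List.cons_append, List.nil_append]
  exact foldl_max_sums xs 0 0

-- ---- B-side: part2_alt moves = runsGo 0 0 (splitRuns moves) ----

lemma alt_loop_eq (rs : List (Int × Nat)) : ∀ (t b : Int),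
    (rs.foldl runStep (t, b)).2 = runsGo t b rs := by
  induction rs with
  | nil => intro t b; simp [runsGo]
  | cons r rs ih => intro t b; cases r with
    | mk v k => rw [List.foldl_cons]; exact (ih _ _).trans (by simp [runsGo])

-- ---- genAcc = expand ∘ splitRuns ----

lemma genAcc_run (tl : List Int) : ∀ (v c : Int),
    genAcc v c tl = seg v c (tl.takeWhile (fun m => m == v)).length ++
      genAcc v (c + ((tl.takeWhile (fun m => m == v)).length : Int)) (tl.dropWhile (fun m => m == v)) := by
  induction tl with
  | nil => intro v c; simp [genAcc, seg]
  | cons m tl ih =>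
    intro v c
    by_cases h : m = v
    · subst h
      rw [show (m :: tl).takeWhile (fun x => x == m) = m :: tl.takeWhile (fun x => x == m) from by
            simp,
          show (m :: tl).dropWhile (fun x => x == m) = tl.dropWhile (fun x => x == m) from by
            simp]
      rw [show genAcc m c (m :: tl) = (c + 1) * m :: genAcc m (c + 1) tl from by simp [genAcc]]
      rw [ih m (c + 1)]
      simp [seg]
      ring_nf
    · rw [show (m :: tl).takeWhile (fun x => x == v) = [] from by simp [h],
          show (m :: tl).dropWhile (fun x => x == v) = m :: tl from by simp [h]]
      simp [seg]

lemma genAcc_reset (x : Int) (xs : List Int) : ∀ (p c q : Int), x ≠ p →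
    genAcc p c (x :: xs) = genAcc q 0 (x :: xs) := by
  intro p c q hx
  simp [genAcc, hx]

lemma dropWhile_head_ne (v : Int) : ∀ (l : List Int) (x : Int) (xs : List Int),
    l.dropWhile (fun m => m == v) = x :: xs → x ≠ v := by
  intro l
  induction l with
  | nil => intro x xs h; simp at h
  | cons m tl ih =>
    intro x xs h
    by_cases hm : m = v
    · exact ih x xs (by simpa [List.dropWhile_cons, hm] using h)
    · rw [List.dropWhile_cons] at h
      simp [hm] at h
      rw [← h.1]; exact hm

lemma genAcc_split' (n : Nat) : ∀ (ms : List Int), ms.length ≤ n → ∀ (p : Int),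
    genAcc p 0 ms = expand (splitRuns ms) := by
  induction n with
  | zero =>
    intro ms h p
    rw [List.length_eq_zero_iff.mp (Nat.le_zero.mp h)]
    simp [genAcc, splitRuns, expand]
  | succ n ih =>
    intro ms h p
    cases ms with
    | nil => simp [genAcc, splitRuns, expand]
    | cons v tl =>
      rw [show genAcc p 0 (v :: tl) = 1 * v :: genAcc v 1 tl from by
            by_cases hvp : v = p <;> simp [genAcc, hvp]]
      rw [genAcc_run tl v 1]
      rw [show splitRuns (v :: tl) =
            (v, 1 + (tl.takeWhile (fun m => m == v)).length) ::
              splitRuns (tl.dropWhile (fun m => m == v)) from by rw [splitRuns]]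
      have hdrop : genAcc v (1 + ((tl.takeWhile (fun m => m == v)).length : Int))
          (tl.dropWhile (fun m => m == v)) = expand (splitRuns (tl.dropWhile (fun m => m == v))) := by
        cases hd : tl.dropWhile (fun m => m == v) with
        | nil => simp [genAcc, splitRuns, expand]
        | cons x xs =>
          have hx : x ≠ v := dropWhile_head_ne v tl x xs hd
          rw [genAcc_reset x xs v _ v hx]
          exact ih (x :: xs) (by
            have := List.length_dropWhile_le (fun m => m == v) tl
            rw [hd] at this
            simpa using Nat.le_trans this (Nat.le_of_succ_le_succ h)) v
      rw [hdrop]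
      show _ = expand ((v, 1 + (tl.takeWhile (fun m => m == v)).length) :: _)
      rw [show expand ((v, 1 + (tl.takeWhile (fun m => m == v)).length) ::
            splitRuns (tl.dropWhile (fun m => m == v)))
          = seg v 0 (1 + (tl.takeWhile (fun m => m == v)).length) ++
              expand (splitRuns (tl.dropWhile (fun m => m == v))) from rfl]
      rw [show (1 + (tl.takeWhile (fun m => m == v)).length) =
            ((tl.takeWhile (fun m => m == v)).length + 1) from by omega]
      simp [seg]

lemma genAcc_split (ms : List Int) : genAcc 0 0 ms = expand (splitRuns ms) :=
  genAcc_split' ms.length ms le_rfl 0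

-- ---- maxAcc over expand rs = runsGo ----

lemma maxAcc_append (xs : List Int) : ∀ (t b : Int) (ys : List Int),
    maxAcc t b (xs ++ ys) = maxAcc (t + xs.sum) (maxAcc t b xs) ys := by
  induction xs with
  | nil => intro t b ys; simp [maxAcc]
  | cons x xs ih =>
    intro t b ys
    simp only [List.cons_append, maxAcc, List.sum_cons]
    rw [ih]
    ring_nf

lemma seg_sum_two (k : Nat) : ∀ (v c : Int),
    (seg v c k).sum * 2 = v * (k : Int) * (2 * c + (k : Int) + 1) := by
  induction k with
  | zero => intro v c; simp [seg]
  | succ k ih =>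
    intro v c
    simp only [seg, List.sum_cons]
    have := ih v (c + 1)
    push_cast at this ⊢
    nlinarith [this]

lemma floordiv_seg (v : Int) (k : Nat) :
    PySem.Int.floordiv (v * (k : Int) * ((k : Int) + 1)) 2 = (seg v 0 k).sum := by
  have h := seg_sum_two k v 0
  rw [PySem.Int.floordiv_eq_ediv_of_pos (by norm_num)]
  rw [show v * (k : Int) * ((k : Int) + 1) = (seg v 0 k).sum * 2 from by rw [h]; ring]
  omega

lemma seg_sum_nonpos (v : Int) (hv : v ≤ 0) : ∀ (k : Nat) (c : Int), 0 ≤ c →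
    (seg v c k).sum ≤ 0 := by
  intro k
  induction k with
  | zero => intro c _; simp [seg]
  | succ k ih =>
    intro c hc
    simp only [seg, List.sum_cons]
    have h1 : (c + 1) * v ≤ 0 := mul_nonpos_of_nonneg_of_nonpos (by linarith) hv
    have h2 := ih (c + 1) (by linarith)
    linarith

lemma seg_sum_nonneg (v : Int) (hv : 0 < v) : ∀ (k : Nat) (c : Int), 0 ≤ c →
    0 ≤ (seg v c k).sum := by
  intro k
  induction k with
  | zero => intro c _; simp [seg]
  | succ k ih =>
    intro c hc
    simp only [seg, List.sum_cons]
    have h1 : 0 ≤ (c + 1) * v := mul_nonneg (by linarith) (by linarith)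
    have h2 := ih (c + 1) (by linarith)
    linarith

lemma maxAcc_seg_nonpos (v : Int) (hv : v ≤ 0) : ∀ (k : Nat) (c t b : Int), 0 ≤ c → t ≤ b →
    maxAcc t b (seg v c k) = b := by
  intro k
  induction k with
  | zero => intro c t b _ _; simp [seg, maxAcc]
  | succ k ih =>
    intro c t b hc htb
    simp only [seg, maxAcc]
    have h1 : (c + 1) * v ≤ 0 := mul_nonpos_of_nonneg_of_nonpos (by linarith) hv
    rw [max_eq_left (by linarith)]
    exact ih (c + 1) _ b (by linarith) (by linarith)

lemma maxAcc_seg_pos (v : Int) (hv : 0 < v) : ∀ (k : Nat) (c t b : Int), 0 ≤ c → t ≤ b →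
    maxAcc t b (seg v c k) = max b (t + (seg v c k).sum) := by
  intro k
  induction k with
  | zero => intro c t b _ htb; simp [seg, maxAcc]; omega
  | succ k ih =>
    intro c t b hc htb
    simp only [seg, maxAcc, List.sum_cons]
    rw [ih (c + 1) _ _ (by linarith) (le_max_right _ _)]
    have hs : 0 ≤ (seg v (c + 1) k).sum := seg_sum_nonneg v hv k (c + 1) (by linarith)
    have hinner : max (t + (c + 1) * v) (t + (c + 1) * v + (seg v (c + 1) k).sum)
        = t + (c + 1) * v + (seg v (c + 1) k).sum := max_eq_right (by linarith)
    rw [max_assoc, hinner, add_assoc]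

lemma maxAcc_expand (rs : List (Int × Nat)) : ∀ (t b : Int), t ≤ b →
    maxAcc t b (expand rs) = runsGo t b rs := by
  induction rs with
  | nil => intro t b _; simp [expand, maxAcc, runsGo]
  | cons r rs ih =>
    intro t b htb
    cases r with
    | mk v k =>
      simp only [expand, runsGo]
      rw [maxAcc_append, floordiv_seg]
      by_cases hv : 0 < v
      · rw [maxAcc_seg_pos v hv k 0 t b le_rfl htb]
        rw [show (if v > 0 ∧ t + (seg v 0 k).sum > b then t + (seg v 0 k).sum else b)
            = max b (t + (seg v 0 k).sum) from by rw [max_def]; split_ifs <;> omega]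
        exact ih _ _ (le_max_right _ _)
      · rw [maxAcc_seg_nonpos v (by linarith) k 0 t b le_rfl htb]
        rw [show (if v > 0 ∧ t + (seg v 0 k).sum > b then t + (seg v 0 k).sum else b) = b from by
          simp [hv]]
        exact ih _ _ (by
          have := seg_sum_nonpos v (by linarith) k 0 le_rfl
          linarith)

-- ===== VERDICT (by name: the statement is the Claim_ definition above) =====
theorem part2_spec : Claim_equal_part2 := by
  intro moves _
  unfold Spec_part2 part2 part2_alt
  rw [part2_loop_acc moves 0 0 [], List.nil_append, max_accumulated_eq, genAcc_split,
    maxAcc_expand _ 0 0 le_rfl, alt_loop_eq]
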